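-- pv_equiv track=rewrite | github.com/skywalkerw/jdtls-lsp-py | src/jdtls_lsp/callchain.py | _collect_method_annotations
-- ===== SOURCE A (Python) =====
-- def _collect_method_annotations(lines: list[str], sig_line: int) -> list[str]:
--     out: list[str] = []
--     i = sig_line - 1
--     while i >= 0:
--         s = lines[i].strip()
--         if s.startswith("@"):
--             out.insert(0, lines[i])
--             i -= 1
--             continue
--         if not s:
--             i -= 1
--             continue
--         break
--     return out
-- ===== SOURCE B (Python) =====
-- def _collect_method_annotations(lines: list[str], sig_line: int) -> list[str]:
--     # Forward single pass over the lines above the signature: accumulate annotation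
--     # lines, keep them across blanks, and reset the accumulator at any other line.
--     pending: list[str] = []
--     for i in range(sig_line):
--         s = lines[i].strip()
--         if s.startswith("@"):
--             pending.append(lines[i])
--         elif s:
--             pending = []
--     return pending
-- ===== Notes on version B (the rewrite author's own statement) =====
-- stated objective: alternative
-- what changed: Replaces A's backward scan from the signature (prepending into the result and breaking at the first ordinary line) with a forward single pass from the top of the file that accumulates annotation lines and resets the accumulator at every non-blank non-annotation line.
-- outside the precondition, e.g. on _collect_method_annotations(['x'], 2): A raises IndexError, B raises IndexError
import Mathlib
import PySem

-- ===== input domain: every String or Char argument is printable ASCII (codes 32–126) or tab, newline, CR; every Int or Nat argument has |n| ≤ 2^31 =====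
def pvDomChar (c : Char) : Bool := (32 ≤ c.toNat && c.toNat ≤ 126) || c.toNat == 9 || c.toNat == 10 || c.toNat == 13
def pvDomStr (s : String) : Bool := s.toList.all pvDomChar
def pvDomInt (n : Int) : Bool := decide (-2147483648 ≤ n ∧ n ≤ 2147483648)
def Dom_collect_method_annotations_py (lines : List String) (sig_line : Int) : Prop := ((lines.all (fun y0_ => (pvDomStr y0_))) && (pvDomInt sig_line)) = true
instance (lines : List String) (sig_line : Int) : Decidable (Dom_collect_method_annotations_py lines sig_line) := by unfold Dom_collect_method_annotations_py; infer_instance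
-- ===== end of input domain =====

-- B replaces A's backward scan from the signature with a forward single pass from the
-- top that accumulates annotation lines and resets at ordinary lines; equal return value.

-- ===== PORT A =====
-- A's while-loop: descend from sig_line-1, prepend annotation lines, skip blanks, break otherwise.
def pvALoop (lines : List String) (i : Int) (out : List String) : List String :=
  if _h : 0 ≤ i then
    let s := PySem.Str.strip (PySem.List.pyGetD lines i "")
    if PySem.Str.startswith s "@" then
      pvALoop lines (i - 1) (PySem.List.pyGetD lines i "" :: out)
    else if s = "" then
      pvALoop lines (i - 1) out
    else out
  else out
termination_by (i + 1).toNat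
decreasing_by all_goals omega

def collect_method_annotations_py (lines : List String) (sig_line : Int) : List String :=
  pvALoop lines (sig_line - 1) []

-- ===== PORT B =====
-- B's forward pass: for i in range(sig_line), append annotation lines, reset at ordinary lines.
def pvBStep (lines : List String) (pending : List String) (i : Int) : List String :=
  let s := PySem.Str.strip (PySem.List.pyGetD lines i "")
  if PySem.Str.startswith s "@" then pending ++ [PySem.List.pyGetD lines i ""]
  else if s ≠ "" then []
  else pending

def collect_method_annotations_py_alt (lines : List String) (sig_line : Int) : List String :=
  (PySem.List.pyRange 0 sig_line 1).foldl (pvBStep lines) []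

-- ===== PRECONDITION & SPEC =====
-- A raises IndexError exactly when sig_line > len(lines) (first access lines[sig_line-1] is
-- past the end); Pre_ excludes exactly those inputs (B raises there too).
def Pre_collect_method_annotations_py (lines : List String) (sig_line : Int) : Prop :=
  sig_line ≤ (lines.length : Int)
instance (lines : List String) (sig_line : Int) : Decidable (Pre_collect_method_annotations_py lines sig_line) := by unfold Pre_collect_method_annotations_py; infer_instance

def pvWitness_collect_method_annotations_py : List String × Int := (["@Foo", "def f():"], 1)

def Spec_collect_method_annotations_py (lines : List String) (sig_line : Int) (out : List String) : Prop := out = collect_method_annotations_py_alt lines sig_line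
instance (lines : List String) (sig_line : Int) (out : List String) : Decidable (Spec_collect_method_annotations_py lines sig_line out) := by unfold Spec_collect_method_annotations_py; infer_instance

-- ===== CLAIM (what is proved, stated in full; the proofs are below) =====
def Claim_equal_collect_method_annotations_py : Prop := ∀ (lines : List String) (sig_line : Int), Dom_collect_method_annotations_py lines sig_line → Pre_collect_method_annotations_py lines sig_line → Spec_collect_method_annotations_py lines sig_line (collect_method_annotations_py lines sig_line)

-- ===== LEMMAS AND PROOFS =====

-- boundary of the annotation/blank gap above index i (proof device shared by both sides)
def pvBoundary (lines : List String) (i : Int) : Int :=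
  if _h : 0 ≤ i ∧ (PySem.Str.strip (PySem.List.pyGetD lines i "") = "" ∨
      PySem.Str.startswith (PySem.Str.strip (PySem.List.pyGetD lines i "")) "@") then
    pvBoundary lines (i - 1)
  else i
termination_by (i + 1).toNat
decreasing_by omega

lemma pvSlice_self {α : Type} (xs : List α) (a : Int) :
    PySem.List.slice xs (some a) (some a) = [] := by
  have h := PySem.List.length_slice xs a a
  have : (PySem.List.slice xs (some a) (some a)).length = 0 := by omega
  exact List.eq_nil_of_length_eq_zero this

lemma pvBoundary_le (lines : List String) (i : Int) : pvBoundary lines i ≤ i := by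
  induction i using pvBoundary.induct lines with
  | case1 i h ih => rw [pvBoundary, dif_pos h]; omega
  | case2 i h => rw [pvBoundary, dif_neg h]

lemma pvBoundary_ge (lines : List String) (i : Int) (h : -1 ≤ i) :
    -1 ≤ pvBoundary lines i := by
  induction i using pvBoundary.induct lines with
  | case1 i hc ih => rw [pvBoundary, dif_pos hc]; exact ih (by omega)
  | case2 i hc => rw [pvBoundary, dif_neg hc]; omega

-- splitting one element off the top of the gap slice
lemma pvSlice_snoc (lines : List String) (a i : Int) (ha : 0 ≤ a) (hai : a ≤ i)
    (hi : i < (lines.length : Int)) :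
    PySem.List.slice lines (some a) (some (i + 1)) =
      PySem.List.slice lines (some a) (some i) ++ [lines[i.toNat]'(by omega)] := by
  rw [PySem.List.slice_toNat lines ha (show (0:Int) ≤ i + 1 by omega),
      PySem.List.slice_toNat lines ha (show (0:Int) ≤ i by omega)]
  have h1 : (i+1).toNat - a.toNat = (i.toNat - a.toNat) + 1 := by omega
  rw [h1, List.take_add_one]
  congr 1
  have hidx : i.toNat - a.toNat < (lines.drop a.toNat).length := by
    simp [List.length_drop]; omega
  rw [List.getElem?_eq_getElem hidx]
  simp [List.getElem_drop]
  congr 1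
  omega

-- characterisation of A's loop: the filtered gap slice, prepended to out
lemma pvMainA (lines : List String) (i : Int) (out : List String)
    (hlen : i < (lines.length : Int)) :
    pvALoop lines i out =
      (PySem.List.slice lines (some (pvBoundary lines i + 1)) (some (i + 1))).filter
        (fun ln => PySem.Str.startswith (PySem.Str.strip ln) "@") ++ out := by
  induction i using pvBoundary.induct lines generalizing out with
  | case1 i hc ih =>
    obtain ⟨hi0, hcase⟩ := hc
    have hget : PySem.List.pyGetD lines i "" = lines[i.toNat]'(by omega) :=
      PySem.List.pyGetD_eq_getElem lines "" hi0 hlen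
    have hb := pvBoundary_le lines (i - 1)
    have hbg := pvBoundary_ge lines (i - 1) (by omega)
    have hsplit := pvSlice_snoc lines (pvBoundary lines (i - 1) + 1) i
      (by omega) (by omega) hlen
    rw [pvBoundary, dif_pos ⟨hi0, hcase⟩]
    rw [show i - 1 + 1 = i from by omega] at ih
    by_cases hat : PySem.Str.startswith (PySem.Str.strip (PySem.List.pyGetD lines i "")) "@"
    · rw [pvALoop, dif_pos hi0, if_pos hat, ih _ (by omega), hsplit, List.filter_append]
      simp only [List.filter_cons, List.filter_nil]
      rw [hget] at hat
      simp at hat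
      simp [hat, hget]
    · have hblank : PySem.Str.strip (PySem.List.pyGetD lines i "") = "" := by
        rcases hcase with h | h
        · exact h
        · exact absurd h hat
      rw [pvALoop, dif_pos hi0, if_neg hat, if_pos hblank, ih _ (by omega), hsplit,
        List.filter_append]
      simp only [List.filter_cons, List.filter_nil]
      rw [hget] at hat
      simp at hat
      simp [hat]
  | case2 i hc =>
    rw [pvBoundary, dif_neg hc]
    by_cases hi0 : 0 ≤ i
    · have hcond : ¬ (PySem.Str.strip (PySem.List.pyGetD lines i "") = "" ∨
          PySem.Str.startswith (PySem.Str.strip (PySem.List.pyGetD lines i "")) "@") :=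
        fun hor => hc ⟨hi0, hor⟩
      rw [not_or] at hcond
      rw [pvALoop, dif_pos hi0, if_neg hcond.2, if_neg hcond.1, pvSlice_self]
      simp
    · rw [pvALoop, dif_neg hi0, pvSlice_self]
      simp

-- characterisation of B's forward fold by the same filtered gap slice
lemma pvMainB (lines : List String) (n : Nat) (hn : n ≤ lines.length) :
    (PySem.List.pyRange 0 (n : Int) 1).foldl (pvBStep lines) [] =
      (PySem.List.slice lines (some (pvBoundary lines ((n : Int) - 1) + 1))
        (some (n : Int))).filter
        (fun ln => PySem.Str.startswith (PySem.Str.strip ln) "@") := by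
  induction n with
  | zero =>
    rw [PySem.List.pyRange_one_eq_nil (by omega), pvBoundary,
      dif_neg (by intro h; omega : ¬ _)]
    simp [pvSlice_self]
  | succ m ih =>
    have hm : (m : Int) ≤ (m : Int) := le_refl _
    have hrange : PySem.List.pyRange 0 ((m : Int) + 1) 1 =
        PySem.List.pyRange 0 (m : Int) 1 ++ [(m : Int)] :=
      PySem.List.pyRange_one_succ_right (by omega)
    have hcast : ((m + 1 : Nat) : Int) = (m : Int) + 1 := by push_cast; ring
    have hlen : (m : Int) < (lines.length : Int) := by exact_mod_cast (by omega : m < lines.length)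
    have hget : PySem.List.pyGetD lines (m : Int) "" = lines[m]'(by omega) := by
      have := PySem.List.pyGetD_eq_getElem lines "" (show (0:Int) ≤ (m:Int) by omega) hlen
      simpa using this
    have hb := pvBoundary_le lines ((m : Int) - 1)
    have hbg := pvBoundary_ge lines ((m : Int) - 1) (by omega)
    have hsplit := pvSlice_snoc lines (pvBoundary lines ((m : Int) - 1) + 1) (m : Int)
      (by omega) (by omega) hlen
    rw [hcast, hrange, List.foldl_append, List.foldl_cons, List.foldl_nil, ih (by omega)]
    rw [show (m : Int) + 1 - 1 = (m : Int) from by omega]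
    by_cases hat : PySem.Str.startswith (PySem.Str.strip (PySem.List.pyGetD lines (m:Int) "")) "@"
    · -- annotation line: both sides append lines[m]
      have hbd : pvBoundary lines (m : Int) = pvBoundary lines ((m : Int) - 1) := by
        rw [pvBoundary, dif_pos ⟨by omega, Or.inr hat⟩]
      rw [hbd, hsplit, List.filter_append]
      rw [hget] at hat
      simp at hat
      simp only [pvBStep, hget]
      simp [hat]
    · by_cases hblank : PySem.Str.strip (PySem.List.pyGetD lines (m:Int) "") = ""
      · -- blank line: accumulator unchanged, snoc filtered out
        have hbd : pvBoundary lines (m : Int) = pvBoundary lines ((m : Int) - 1) := by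
          rw [pvBoundary, dif_pos ⟨by omega, Or.inl hblank⟩]
        rw [hbd, hsplit, List.filter_append]
        rw [hget] at hat hblank
        simp at hat
        simp only [pvBStep, hget]
        simp [hat, hblank]
        decide
      · -- ordinary line: reset; boundary becomes m, slice (m+1, m+1) is empty
        have hbd : pvBoundary lines (m : Int) = (m : Int) := by
          rw [pvBoundary, dif_neg (by
            intro h
            rcases h.2 with h' | h'
            · exact hblank h'
            · exact hat h')]
        rw [hbd, pvSlice_self]
        rw [hget] at hat hblank
        simp at hat
        simp only [pvBStep, hget]
        simp [hat, hblank]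

-- ===== VERDICT (by name: the statement is the Claim_ definition above) =====
theorem collect_method_annotations_py_spec : Claim_equal_collect_method_annotations_py := by
  intro lines sig_line _hdom hpre
  unfold Spec_collect_method_annotations_py collect_method_annotations_py
    collect_method_annotations_py_alt
  unfold Pre_collect_method_annotations_py at hpre
  by_cases hpos : 0 < sig_line
  · have hn : sig_line = ((sig_line.toNat : Nat) : Int) := by omega
    have hA := pvMainA lines (sig_line - 1) [] (by omega)
    simp only [List.append_nil, show sig_line - 1 + 1 = sig_line from by omega] at hA
    rw [hA, hn, pvMainB lines sig_line.toNat (by omega)]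
  · rw [PySem.List.pyRange_one_eq_nil (by omega), List.foldl_nil, pvALoop,
      dif_neg (by omega : ¬ (0 : Int) ≤ sig_line - 1)]
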